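-- pv_equiv track=rewrite | github.com/dillihang/Python-learning | Part 1-5/references4.py | play_turn
-- ===== SOURCE A (Python) =====
-- def play_turn(game_board: list, x: int, y:int, piece:str):
--
--     for row in range(len(game_board)):
--         if row==y:
--             for column in range(len(game_board[row])):
--                 if column==x and game_board[row][column]=="":
--                     game_board[row][column]=piece
--                     return True
--
--     return False
-- ===== SOURCE B (Python) =====
-- def play_turn(game_board: list, x: int, y: int, piece: str):
--     if 0 <= y < len(game_board) and 0 <= x < len(game_board[y]) and game_board[y][x] == "":
--         game_board[y][x] = piece
--         return True
--     return False
-- ===== Notes on version B (the rewrite author's own statement) =====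
-- stated objective: simpler
-- what changed: Replaces the two nested index-scanning loops with a single bounds-and-emptiness guard followed by O(1) direct indexing of the target cell.
import Mathlib
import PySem

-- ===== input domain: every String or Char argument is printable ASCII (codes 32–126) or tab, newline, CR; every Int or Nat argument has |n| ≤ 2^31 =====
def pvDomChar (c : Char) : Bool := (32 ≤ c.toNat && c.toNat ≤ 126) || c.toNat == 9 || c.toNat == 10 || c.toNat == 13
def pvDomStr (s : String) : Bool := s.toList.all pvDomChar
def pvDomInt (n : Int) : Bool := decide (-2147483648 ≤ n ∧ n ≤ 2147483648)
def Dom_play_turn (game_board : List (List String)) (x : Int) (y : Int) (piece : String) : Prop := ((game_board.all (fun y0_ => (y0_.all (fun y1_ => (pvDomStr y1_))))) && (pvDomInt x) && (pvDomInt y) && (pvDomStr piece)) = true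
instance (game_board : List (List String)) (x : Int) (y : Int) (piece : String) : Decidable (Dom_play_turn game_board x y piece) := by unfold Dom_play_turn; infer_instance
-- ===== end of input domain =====

-- B replaces A's two nested index scans by one bounds-and-emptiness guard with direct indexing (simpler).
-- Both Pythons mutate game_board identically on success; the equivalence proved here is about the RETURN value.

-- ===== PORT A =====
-- inner loop: 'for column in range(len(game_board[row])): if column==x and …=="": return True'
def pvInner (row : List String) (x : Int) : List Int → Bool
  | [] => false
  | c :: cs =>
      if c = x ∧ PySem.List.pyGet? row c = some "" then true else pvInner row x cs

-- outer loop: 'for row in range(len(game_board)): if row==y: <inner>'; falls through to 'return False'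
def pvOuter (game_board : List (List String)) (x y : Int) : List Int → Bool
  | [] => false
  | r :: rs =>
      if r = y then
        (if pvInner (PySem.List.pyGetD game_board r []) x
              (PySem.List.pyRange 0 ((PySem.List.pyGetD game_board r []).length : Int) 1) then true
         else pvOuter game_board x y rs)
      else pvOuter game_board x y rs

def play_turn (game_board : List (List String)) (x : Int) (y : Int) (piece : String) : Bool :=
  pvOuter game_board x y (PySem.List.pyRange 0 (game_board.length : Int) 1)

-- ===== PORT B =====
def play_turn_alt (game_board : List (List String)) (x : Int) (y : Int) (piece : String) : Bool :=
  if 0 ≤ y ∧ y < (game_board.length : Int) then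
    let row := PySem.List.pyGetD game_board y []
    if 0 ≤ x ∧ x < (row.length : Int) ∧ PySem.List.pyGet? row x = some "" then true else false
  else false

-- ===== PRECONDITION & SPEC =====
def Spec_play_turn (game_board : List (List String)) (x : Int) (y : Int) (piece : String) (out : Bool) : Prop := out = play_turn_alt game_board x y piece
instance (game_board : List (List String)) (x : Int) (y : Int) (piece : String) (out : Bool) : Decidable (Spec_play_turn game_board x y piece out) := by unfold Spec_play_turn; infer_instance

-- ===== CLAIM (what is proved, stated in full; the proofs are below) =====
def Claim_equal_play_turn : Prop := ∀ (game_board : List (List String)) (x : Int) (y : Int) (piece : String), Dom_play_turn game_board x y piece → Spec_play_turn game_board x y piece (play_turn game_board x y piece)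

-- ===== LEMMAS AND PROOFS =====

lemma pvInner_eq (row : List String) (x : Int) :
    ∀ (n : ℕ) (a b : Int), (b - a).toNat = n →
      pvInner row x (PySem.List.pyRange a b 1)
        = decide (a ≤ x ∧ x < b ∧ PySem.List.pyGet? row x = some "") := by
  intro n
  induction n with
  | zero =>
      intro a b h
      have hba : b ≤ a := by omega
      rw [PySem.List.pyRange_one_eq_nil hba]
      simp [pvInner]
      omega
  | succ n ih =>
      intro a b h
      have hab : a < b := by omega
      rw [PySem.List.pyRange_one_cons hab]
      simp only [pvInner]
      by_cases hc : a = x ∧ PySem.List.pyGet? row a = some ""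
      · obtain ⟨hax, hg⟩ := hc
        subst hax
        simp [hg, hab]
      · rw [if_neg hc, ih (a + 1) b (by omega)]
        by_cases hax : a = x
        · subst hax
          have : ¬ PySem.List.pyGet? row a = some "" := fun hg => hc ⟨rfl, hg⟩
          simp [this]
        · have h1 : (a ≤ x ∧ x < b ∧ PySem.List.pyGet? row x = some "") ↔
              (a + 1 ≤ x ∧ x < b ∧ PySem.List.pyGet? row x = some "") := by
            constructor
            · rintro ⟨h2, h3, h4⟩; exact ⟨by omega, h3, h4⟩
            · rintro ⟨h2, h3, h4⟩; exact ⟨by omega, h3, h4⟩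
          exact (decide_eq_decide.mpr h1.symm)

lemma pvOuter_eq (game_board : List (List String)) (x y : Int) :
    ∀ (n : ℕ) (a b : Int), (b - a).toNat = n →
      pvOuter game_board x y (PySem.List.pyRange a b 1)
        = if a ≤ y ∧ y < b then
            pvInner (PySem.List.pyGetD game_board y []) x
              (PySem.List.pyRange 0 ((PySem.List.pyGetD game_board y []).length : Int) 1)
          else false := by
  intro n
  induction n with
  | zero =>
      intro a b h
      have hba : b ≤ a := by omega
      rw [PySem.List.pyRange_one_eq_nil hba]
      have : ¬ (a ≤ y ∧ y < b) := by omega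
      simp [pvOuter, this]
  | succ n ih =>
      intro a b h
      have hab : a < b := by omega
      rw [PySem.List.pyRange_one_cons hab]
      simp only [pvOuter]
      by_cases hay : a = y
      · subst hay
        rw [if_pos rfl, ih (a + 1) b (by omega)]
        have h3 : a ≤ a ∧ a < b := ⟨le_refl a, hab⟩
        simp [h3]
      · rw [if_neg hay, ih (a + 1) b (by omega)]
        have h1 : (a ≤ y ∧ y < b) ↔ (a + 1 ≤ y ∧ y < b) := by omega
        rw [if_congr h1 rfl rfl]

-- ===== VERDICT (by name: the statement is the Claim_ definition above) =====
theorem play_turn_spec : Claim_equal_play_turn := by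
  intro game_board x y piece _
  unfold Spec_play_turn play_turn play_turn_alt
  rw [pvOuter_eq game_board x y ((game_board.length : Int) - 0).toNat 0 (game_board.length : Int) rfl]
  by_cases hy : 0 ≤ y ∧ y < (game_board.length : Int)
  · rw [if_pos hy, if_pos hy,
      pvInner_eq _ x (((PySem.List.pyGetD game_board y []).length : Int) - 0).toNat 0 _ rfl]
    simp
  · rw [if_neg hy, if_neg hy]
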